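-- pv_equiv track=rewrite | github.com/Abhishek1098/CS_115 | hw/2/hw2.py | greatestTuple
-- ===== SOURCE A (Python) =====
-- def greatestTuple(L):
--     if L:
--         if isinstance(L[0],list):
--             firstTuple = L[0]
--             if len(L) == 1:
--                 return firstTuple
--             else:
--                 nextTuple = greatestTuple(L[1:])
--                 if nextTuple[1] > firstTuple[1]:
--                     return nextTuple
--                 else:
--                     return firstTuple
--         else:
--             return L
--     else:
--         return []
-- ===== SOURCE B (Python) =====
-- def greatestTuple(L):
--     if not L:
--         return []
--     if not isinstance(L[0], list):
--         return L
--     best = L[0]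
--     for t in L[1:]:
--         if t[1] > best[1]:
--             best = t
--     return best
-- ===== Notes on version B (the rewrite author's own statement) =====
-- stated objective: simpler
-- what changed: Replaced A's tail recursion over L[1:] (a list slice and deferred comparison per step) with a single left-to-right loop keeping the current best element.
import Mathlib
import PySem

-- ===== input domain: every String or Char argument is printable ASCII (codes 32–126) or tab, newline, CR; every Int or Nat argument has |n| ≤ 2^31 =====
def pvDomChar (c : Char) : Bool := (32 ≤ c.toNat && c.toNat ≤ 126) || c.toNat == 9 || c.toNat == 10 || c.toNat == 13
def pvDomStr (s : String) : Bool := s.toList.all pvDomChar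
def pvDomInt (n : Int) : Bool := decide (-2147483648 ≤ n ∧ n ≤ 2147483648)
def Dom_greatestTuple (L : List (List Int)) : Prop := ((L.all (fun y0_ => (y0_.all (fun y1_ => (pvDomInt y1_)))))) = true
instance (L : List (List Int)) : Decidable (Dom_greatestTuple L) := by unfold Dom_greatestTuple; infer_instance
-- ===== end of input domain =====

-- B replaces A's tail recursion over L[1:] with a single left-to-right best-so-far loop (simpler).


-- t[1] (Python raises IndexError out of range; Pre_ excludes those inputs, so the getD default is never used there)
def pvKey (t : List Int) : Int := (PySem.List.pyGet? t 1).getD 0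

-- ===== PORT A =====
-- the 'isinstance(L[0], list)' test is always true at type List (List Int), so the 'return L' branch is unreachable
def greatestTuple : List (List Int) → List Int
  | [] => []
  | firstTuple :: rest =>
    if rest = [] then firstTuple
    else
      let nextTuple := greatestTuple rest
      if pvKey nextTuple > pvKey firstTuple then nextTuple else firstTuple

-- ===== PORT B =====
def greatestTuple_alt (L : List (List Int)) : List Int :=
  match L with
  | [] => []
  | best :: rest => rest.foldl (fun best t => if pvKey t > pvKey best then t else best) best

-- ===== PRECONDITION & SPEC =====
-- Pre_ excludes exactly the inputs where Python's t[1] raises IndexError: some element has length < 2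
-- (unless the list has at most one element, in which case neither program ever subscripts).
def Pre_greatestTuple (L : List (List Int)) : Prop := L.length ≤ 1 ∨ ∀ t ∈ L, 2 ≤ t.length
instance (L : List (List Int)) : Decidable (Pre_greatestTuple L) := by unfold Pre_greatestTuple; infer_instance
def pvWitness_greatestTuple : List (List Int) := [[1, 2], [3, 4], [5, 0]]
def Spec_greatestTuple (L : List (List Int)) (out : List Int) : Prop := out = greatestTuple_alt L
instance (L : List (List Int)) (out : List Int) : Decidable (Spec_greatestTuple L out) := by unfold Spec_greatestTuple; infer_instance

-- ===== CLAIM (what is proved, stated in full; the proofs are below) =====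
def Claim_equal_greatestTuple : Prop := ∀ (L : List (List Int)), Dom_greatestTuple L → Pre_greatestTuple L → Spec_greatestTuple L (greatestTuple L)

-- ===== LEMMAS AND PROOFS =====
def pvStep (best t : List Int) : List Int := if pvKey t > pvKey best then t else best

lemma pvFoldl_sel (rs : List (List Int)) (u t : List Int) :
    List.foldl pvStep t (u :: rs) = pvStep t (List.foldl pvStep u rs) := by
  induction rs generalizing u t with
  | nil => simp [List.foldl]
  | cons v vs ih =>
    show List.foldl pvStep (pvStep t u) (v :: vs) = _
    rw [ih, ih]
    unfold pvStep
    split_ifs <;> first | rfl | omega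

lemma greatestTuple_eq_foldl (t : List Int) (rest : List (List Int)) :
    greatestTuple (t :: rest) = List.foldl pvStep t rest := by
  induction rest generalizing t with
  | nil => simp [greatestTuple]
  | cons u rs ih =>
    rw [pvFoldl_sel, ← ih u]
    show greatestTuple (t :: u :: rs) = pvStep t (greatestTuple (u :: rs))
    rw [greatestTuple]
    simp [pvStep]

-- ===== VERDICT (by name: the statement is the Claim_ definition above) =====
theorem greatestTuple_spec : Claim_equal_greatestTuple := by
  intro L _ _
  unfold Spec_greatestTuple greatestTuple_alt
  cases L with
  | nil => rfl
  | cons t rest => exact greatestTuple_eq_foldl t rest
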